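-- pv_equiv track=rewrite | github.com/devDabo/AdventOfCode | Harry Edwards/day_7.py | part_1
-- ===== SOURCE A (Python) =====
-- import math
--
-- def test_values(numbers: list):
--     if len(numbers) == 1:
--         return_value = [numbers[-1]]
--     else:
--         next_numbers = test_values(numbers[:-1])
--         return_value = [sum([x] + [numbers[-1]]) for x in next_numbers] + [math.prod([x] + [numbers[-1]]) for x in
--                                                                            next_numbers]
--
--     return return_value
--
-- def part_1(content):
--     total = 0
--     for item in content:
--         target = item[0]
--         values = item[1]
--         solutions = test_values(values)
--
--         if target in solutions:
--             total += target
--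
--     return total
-- ===== SOURCE B (Python) =====
-- def part_1(content):
--     total = 0
--     for target, values in content:
--         reach = {values[0]}
--         for v in values[1:]:
--             reach = {x + v for x in reach} | {x * v for x in reach}
--         if target in reach:
--             total += target
--     return total
-- ===== Notes on version B (the rewrite author's own statement) =====
-- stated objective: alternative
-- what changed: Recursive enumeration of all 2^(n-1) operator results as a list is replaced by an iterative left-to-right reachable-set DP with deduplication; Pre_ excludes pairs whose value list is empty, on which A hits infinite recursion (RecursionError).
import Mathlib
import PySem

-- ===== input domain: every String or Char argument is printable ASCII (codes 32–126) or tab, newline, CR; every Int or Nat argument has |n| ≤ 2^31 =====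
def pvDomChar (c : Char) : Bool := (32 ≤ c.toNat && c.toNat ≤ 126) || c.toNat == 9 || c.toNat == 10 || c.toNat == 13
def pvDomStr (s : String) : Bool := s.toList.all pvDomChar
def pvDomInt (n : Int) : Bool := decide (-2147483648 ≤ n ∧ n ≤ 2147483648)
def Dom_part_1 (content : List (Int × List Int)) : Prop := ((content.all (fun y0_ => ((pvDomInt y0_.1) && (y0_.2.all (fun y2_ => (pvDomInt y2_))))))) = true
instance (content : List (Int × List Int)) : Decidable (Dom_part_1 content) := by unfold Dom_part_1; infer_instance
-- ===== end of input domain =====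

-- B replaces A's recursive enumeration of all operator results with an iterative
-- reachable-set DP with deduplication (alternative algorithm, same results).


-- ===== PORT A =====
-- test_values recurses on numbers[:-1], i.e. it peels the LAST element; we transcribe
-- that as structural recursion on the reversed list (exact same computation).
-- The [] case is unreachable in Python (infinite recursion there; excluded by Pre_).
def tvRev : List Int → List Int
  | [] => []
  | [x] => [x]
  | x :: y :: rest =>
      let next := tvRev (y :: rest)
      next.map (fun t => t + x) ++ next.map (fun t => t * x)

def test_values (numbers : List Int) : List Int := tvRev numbers.reverse

def part_1 (content : List (Int × List Int)) : Int :=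
  content.foldl (fun total item =>
    let target := item.1
    let values := item.2
    let solutions := test_values values
    if target ∈ solutions then total + target else total) 0

-- ===== PORT B =====
-- reach = {x+v for x in reach} | {x*v for x in reach}
def reachStep (reach : PySem.Set Int) (v : Int) : PySem.Set Int :=
  PySem.Set.ofList (reach.map (fun x => x + v) ++ reach.map (fun x => x * v))

def part_1_alt (content : List (Int × List Int)) : Int :=
  content.foldl (fun total item =>
    match item.2 with
    | [] => total   -- unreachable under Pre_ (B raises IndexError there)
    | v0 :: rest =>
      let reach := rest.foldl reachStep [v0]
      if item.1 ∈ reach then total + item.1 else total) 0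

-- ===== PRECONDITION & SPEC =====
-- Pre_ excludes pairs with an empty value list: there A recurses forever (RecursionError).
def Pre_part_1 (content : List (Int × List Int)) : Prop :=
  ∀ p ∈ content, p.2 ≠ []
instance (content : List (Int × List Int)) : Decidable (Pre_part_1 content) := by
  unfold Pre_part_1; infer_instance
def pvWitness_part_1 : (List (Int × List Int)) := [(3, [1, 2]), (5, [2, 2])]
def Spec_part_1 (content : List (Int × List Int)) (out : Int) : Prop := out = part_1_alt content
instance (content : List (Int × List Int)) (out : Int) : Decidable (Spec_part_1 content out) := by unfold Spec_part_1; infer_instance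

-- ===== CLAIM (what is proved, stated in full; the proofs are below) =====
def Claim_equal_part_1 : Prop := ∀ (content : List (Int × List Int)), Dom_part_1 content → Pre_part_1 content → Spec_part_1 content (part_1 content)

-- ===== LEMMAS AND PROOFS =====

-- membership in one dedup step
theorem mem_reachStep (r : PySem.Set Int) (v a : Int) :
    a ∈ reachStep r v ↔ ∃ x ∈ r, a = x + v ∨ a = x * v := by
  simp only [reachStep, PySem.Set.mem_ofList, List.mem_append, List.mem_map]
  constructor
  · rintro (⟨x, hx, h⟩ | ⟨x, hx, h⟩)
    · exact ⟨x, hx, Or.inl h.symm⟩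
    · exact ⟨x, hx, Or.inr h.symm⟩
  · rintro ⟨x, hx, h | h⟩
    · exact Or.inl ⟨x, hx, h.symm⟩
    · exact Or.inr ⟨x, hx, h.symm⟩

-- the core: membership in A's solution list equals membership in B's reachable set
theorem mem_tv_iff (v0 : Int) (rest : List Int) :
    ∀ a : Int, a ∈ test_values (v0 :: rest) ↔ a ∈ rest.foldl reachStep [v0] := by
  induction rest using List.reverseRecOn with
  | nil => intro a; simp [test_values, tvRev]
  | append_singleton r v ih =>
      intro a
      have hrev : (v0 :: (r ++ [v])).reverse = v :: (v0 :: r).reverse := by simp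
      have hne : (v0 :: r).reverse ≠ [] := by simp
      have hstep : test_values (v0 :: (r ++ [v])) =
          (test_values (v0 :: r)).map (fun t => t + v) ++
          (test_values (v0 :: r)).map (fun t => t * v) := by
        simp only [test_values, hrev]
        obtain ⟨y, l, hl⟩ : ∃ y l, (v0 :: r).reverse = y :: l :=
          List.exists_cons_of_ne_nil hne
        rw [hl]; rfl
      rw [hstep, List.foldl_append]
      simp only [List.foldl_cons, List.foldl_nil, mem_reachStep]
      simp only [List.mem_append, List.mem_map]
      constructor
      · rintro (⟨x, hx, h⟩ | ⟨x, hx, h⟩)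
        · exact ⟨x, (ih x).mp hx, Or.inl h.symm⟩
        · exact ⟨x, (ih x).mp hx, Or.inr h.symm⟩
      · rintro ⟨x, hx, h | h⟩
        · exact Or.inl ⟨x, (ih x).mpr hx, h.symm⟩
        · exact Or.inr ⟨x, (ih x).mpr hx, h.symm⟩

-- both loop bodies agree item by item, from any accumulator
theorem foldl_agree (content : List (Int × List Int)) (h : ∀ p ∈ content, p.2 ≠ []) :
    ∀ acc : Int,
    content.foldl (fun total item =>
      let target := item.1
      let values := item.2
      let solutions := test_values values
      if target ∈ solutions then total + target else total) acc =
    content.foldl (fun total item =>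
      match item.2 with
      | [] => total
      | v0 :: rest =>
        let reach := rest.foldl reachStep [v0]
        if item.1 ∈ reach then total + item.1 else total) acc := by
  induction content with
  | nil => intro acc; rfl
  | cons hd tl ih =>
      intro acc
      have hhd : hd.2 ≠ [] := h hd (List.mem_cons_self ..)
      obtain ⟨v0, rest, hv⟩ := List.exists_cons_of_ne_nil hhd
      have ih' := ih (fun p hp => h p (List.mem_cons_of_mem _ hp))
      simp only [List.foldl_cons]
      rw [ih']
      congr 1
      simp only [hv]
      exact if_congr (mem_tv_iff v0 rest hd.1) rfl rfl

-- ===== VERDICT (by name: the statement is the Claim_ definition above) =====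
theorem part_1_spec : Claim_equal_part_1 := by
  intro content _ hpre
  unfold Spec_part_1 part_1 part_1_alt
  exact foldl_agree content hpre 0
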